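-- pv_equiv track=rewrite | github.com/Scoder08/sargam-ai | apps/backend/app/services/audio_analysis_service.py | _normalize_rhythm
-- ===== SOURCE A (Python) =====
-- def _normalize_rhythm(time_intervals: list[int]) -> list[str]:
--     """
--     Normalize time intervals to relative rhythm categories.
--     Categories: S (short), M (medium), L (long), X (extra long)
--     """
--     rhythm = []
--     for interval in time_intervals:
--         if interval < 200:
--             rhythm.append('S')
--         elif interval < 500:
--             rhythm.append('M')
--         elif interval < 1000:
--             rhythm.append('L')
--         else:
--             rhythm.append('X')
--     return rhythm
-- ===== SOURCE B (Python) =====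
-- def _normalize_rhythm(time_intervals: list[int]) -> list[str]:
--     # Staged refinement: start everything at 'X', then three successive passes
--     # (descending thresholds) overwrite positions whose interval lies below the bound.
--     out = ['X'] * len(time_intervals)
--     for label, bound in (('L', 1000), ('M', 500), ('S', 200)):
--         out = [label if iv < bound else o for iv, o in zip(time_intervals, out)]
--     return out
-- ===== Notes on version B (the rewrite author's own statement) =====
-- stated objective: alternative
-- what changed: Replaces the per-element if/elif cascade with staged refinement: initialise all labels to 'X' and run three whole-list overwrite passes with descending thresholds (1000/'L', 500/'M', 200/'S'), each rewriting positions below its bound.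
import Mathlib
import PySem

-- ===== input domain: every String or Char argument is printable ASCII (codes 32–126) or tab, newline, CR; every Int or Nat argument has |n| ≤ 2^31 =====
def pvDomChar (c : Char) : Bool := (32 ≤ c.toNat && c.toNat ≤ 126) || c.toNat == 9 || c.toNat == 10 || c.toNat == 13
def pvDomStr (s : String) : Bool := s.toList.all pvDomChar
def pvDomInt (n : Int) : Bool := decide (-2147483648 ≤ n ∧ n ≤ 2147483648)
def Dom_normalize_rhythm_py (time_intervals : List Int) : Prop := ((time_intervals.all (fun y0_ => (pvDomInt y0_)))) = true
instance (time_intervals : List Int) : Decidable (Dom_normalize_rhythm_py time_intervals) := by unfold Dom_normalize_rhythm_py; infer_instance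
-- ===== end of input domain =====

-- B replaces A's single-pass if/elif cascade by staged refinement: all 'X', then three overwrite passes with descending thresholds; same return values, no speed claim.

-- ===== PORT A =====
def normalize_rhythm_py (time_intervals : List Int) : List String :=
  time_intervals.foldl (fun rhythm interval =>
    if interval < 200 then rhythm ++ ["S"]
    else if interval < 500 then rhythm ++ ["M"]
    else if interval < 1000 then rhythm ++ ["L"]
    else rhythm ++ ["X"]) []

-- ===== PORT B =====
-- out = ['X'] * len(...) → List.replicate; each comprehension over zip(time_intervals, out) → List.zipWith
def normalize_rhythm_py_alt (time_intervals : List Int) : List String :=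
  [("L", (1000 : Int)), ("M", 500), ("S", 200)].foldl
    (fun out p => List.zipWith (fun iv o => if iv < p.2 then p.1 else o) time_intervals out)
    (List.replicate time_intervals.length "X")

-- ===== PRECONDITION & SPEC =====
def Spec_normalize_rhythm_py (time_intervals : List Int) (out : List String) : Prop := out = normalize_rhythm_py_alt time_intervals
instance (time_intervals : List Int) (out : List String) : Decidable (Spec_normalize_rhythm_py time_intervals out) := by unfold Spec_normalize_rhythm_py; infer_instance

-- ===== CLAIM (what is proved, stated in full; the proofs are below) =====
def Claim_equal_normalize_rhythm_py : Prop := ∀ (time_intervals : List Int), Dom_normalize_rhythm_py time_intervals → Spec_normalize_rhythm_py time_intervals (normalize_rhythm_py time_intervals)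

-- ===== LEMMAS AND PROOFS =====

-- A's foldl with singleton appends, rewritten to acc ++ map
theorem pv_foldl_map (ts : List Int) (acc : List String) :
    ts.foldl (fun rhythm interval =>
      if interval < 200 then rhythm ++ ["S"]
      else if interval < 500 then rhythm ++ ["M"]
      else if interval < 1000 then rhythm ++ ["L"]
      else rhythm ++ ["X"]) acc
    = acc ++ ts.map (fun iv =>
        if iv < 200 then "S" else if iv < 500 then "M" else if iv < 1000 then "L" else "X") := by
  induction ts generalizing acc with
  | nil => simp
  | cons x xs ih => simp only [List.foldl, List.map]; split_ifs <;> simp [ih]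

-- two B-passes compose pointwise
theorem pv_zipWith_comp {α β γ : Type} (f : Int → β → γ) (h : Int → α → β)
    (xs : List Int) (ys : List α) :
    List.zipWith f xs (List.zipWith h xs ys) = List.zipWith (fun a b => f a (h a b)) xs ys := by
  induction xs generalizing ys with
  | nil => simp
  | cons x xs ih => cases ys with
    | nil => simp
    | cons y ys => simp [ih]

-- the initial 'X' pass over a replicate is a map
theorem pv_zipWith_replicate {β : Type} (f : Int → String → β) (xs : List Int) (c : String) :
    List.zipWith f xs (List.replicate xs.length c) = xs.map (fun a => f a c) := by
  induction xs with
  | nil => simp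
  | cons x xs ih => simp [List.replicate, ih]

theorem normalize_rhythm_py_spec : Claim_equal_normalize_rhythm_py := by
  intro ts _
  show normalize_rhythm_py ts = normalize_rhythm_py_alt ts
  rw [normalize_rhythm_py, normalize_rhythm_py_alt, pv_foldl_map]
  simp only [List.foldl, List.nil_append]
  rw [pv_zipWith_comp, pv_zipWith_comp, pv_zipWith_replicate]
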